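-- pv_equiv track=rewrite | github.com/subha-v/sushma-zscale | scripts/intelligence/rss_ingest.py | auto_tag
-- ===== SOURCE A (Python) =====
-- def auto_tag(text: str, tag_mapping: dict) -> tuple[list[str], list[str]]:
--     """Scan text against keyword mappings, return (topic_tags, audience_tags)."""
--     text_lower = text.lower()
--
--     topic_tags = []
--     for tag, keywords in tag_mapping.get("topic_keywords", {}).items():
--         for kw in keywords:
--             if kw in text_lower:
--                 topic_tags.append(tag)
--                 break
--
--     audience_tags = []
--     for tag, keywords in tag_mapping.get("audience_keywords", {}).items():
--         for kw in keywords: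
--             if kw in text_lower:
--                 audience_tags.append(tag)
--                 break
--
--     return topic_tags, audience_tags
-- ===== SOURCE B (Python) =====
-- def auto_tag(text: str, tag_mapping: dict) -> tuple[list[str], list[str]]:
--     """Scan text against keyword mappings, return (topic_tags, audience_tags).
--
--     Deduplicate all keywords across both sections, run one membership test per
--     distinct keyword, then emit tags (in mapping order) whose keyword list
--     intersects the set of found keywords.
--     """
--     t = text.lower()
--     topics = tag_mapping.get("topic_keywords", {})
--     audiences = tag_mapping.get("audience_keywords", {})
--     kws = {kw for sec in (topics, audiences) for ks in sec.values() for kw in ks}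
--     found = {kw for kw in kws if kw in t}
--     topic_tags = [tag for tag, ks in topics.items() if found.intersection(ks)]
--     audience_tags = [tag for tag, ks in audiences.items() if found.intersection(ks)]
--     return topic_tags, audience_tags
-- ===== Notes on version B (the rewrite author's own statement) =====
-- stated objective: alternative
-- what changed: B deduplicates all keywords of both sections into one set, tests each distinct keyword against the lowered text exactly once, and then emits tags in mapping order by intersecting each tag's keyword list with the found set; A instead scans the text per tag, per keyword, with an early break.
import Mathlib
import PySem

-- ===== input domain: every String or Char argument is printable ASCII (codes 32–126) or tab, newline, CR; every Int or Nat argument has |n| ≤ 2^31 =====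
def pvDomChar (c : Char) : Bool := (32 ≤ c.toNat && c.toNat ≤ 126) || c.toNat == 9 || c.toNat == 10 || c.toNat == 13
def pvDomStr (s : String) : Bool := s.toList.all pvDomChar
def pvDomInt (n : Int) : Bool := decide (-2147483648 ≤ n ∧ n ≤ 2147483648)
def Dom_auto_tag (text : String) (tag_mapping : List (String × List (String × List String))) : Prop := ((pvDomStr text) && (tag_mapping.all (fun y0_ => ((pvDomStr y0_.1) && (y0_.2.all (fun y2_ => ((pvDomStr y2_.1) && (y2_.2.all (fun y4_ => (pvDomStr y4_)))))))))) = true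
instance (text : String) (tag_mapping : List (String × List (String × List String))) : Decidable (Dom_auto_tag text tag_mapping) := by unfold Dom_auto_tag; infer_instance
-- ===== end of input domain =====

-- B deduplicates all keywords of both sections, tests each distinct keyword against the
-- lowered text once, and emits tags in mapping order by intersecting each tag's keyword
-- list with the found set; A scans per tag, per keyword, with an early break (objective: alternative).

-- ===== PORT A =====
-- inner loop 'for kw in keywords: if kw in text_lower: append(tag); break'
def pvHitA (tl : List Char) : List String → Bool
  | [] => false
  | kw :: rest => if PySem.Chars.isIn kw.toList tl then true else pvHitA tl rest

-- one 'for tag, keywords in ….items():' loop of A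
def pvSectionA (tl : List Char) (sec : List (String × List String)) : List String :=
  sec.foldl (fun acc p => if pvHitA tl p.2 then acc ++ [p.1] else acc) []

def auto_tag (text : String) (tag_mapping : List (String × List (String × List String))) :
    List String × List String :=
  let tl := PySem.Chars.lower text.toList
  let topics := (PySem.Dict.mk tag_mapping).getD "topic_keywords" []
  let auds := (PySem.Dict.mk tag_mapping).getD "audience_keywords" []
  (pvSectionA tl topics, pvSectionA tl auds)

-- ===== PORT B =====
-- 'found = {kw for kw in kws if kw in t}' — a set built from a set, so order-independent
def pvFound (tl : List Char) (kws : PySem.Set String) : PySem.Set String :=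
  kws.foldl
    (fun f kw => if PySem.Chars.isIn kw.toList tl then PySem.Set.add f kw else f)
    PySem.Set.empty

-- '[tag for tag, ks in sec.items() if found.intersection(ks)]'
def pvEmit (found : PySem.Set String) (sec : List (String × List String)) : List String :=
  (sec.filter (fun p => !(PySem.Set.inter found p.2).isEmpty)).map (·.1)

def auto_tag_alt (text : String) (tag_mapping : List (String × List (String × List String))) :
    List String × List String :=
  let tl := PySem.Chars.lower text.toList
  let topics := (PySem.Dict.mk tag_mapping).getD "topic_keywords" []
  let auds := (PySem.Dict.mk tag_mapping).getD "audience_keywords" []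
  let kws := PySem.Set.ofList ((topics ++ auds).flatMap (·.2))
  let found := pvFound tl kws
  (pvEmit found topics, pvEmit found auds)

-- ===== PRECONDITION & SPEC =====
def Spec_auto_tag (text : String) (tag_mapping : List (String × List (String × List String))) (out : List String × List String) : Prop := out = auto_tag_alt text tag_mapping
instance (text : String) (tag_mapping : List (String × List (String × List String))) (out : List String × List String) : Decidable (Spec_auto_tag text tag_mapping out) := by unfold Spec_auto_tag; infer_instance

-- ===== CLAIM (what is proved, stated in full; the proofs are below) =====
def Claim_equal_auto_tag : Prop := ∀ (text : String) (tag_mapping : List (String × List (String × List String))), Dom_auto_tag text tag_mapping → Spec_auto_tag text tag_mapping (auto_tag text tag_mapping)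

-- ===== LEMMAS AND PROOFS =====

theorem mem_pvFound_aux (tl : List Char) (kws : List String) (f : PySem.Set String)
    (x : String) :
    x ∈ kws.foldl
      (fun f kw => if PySem.Chars.isIn kw.toList tl then PySem.Set.add f kw else f) f ↔
      x ∈ f ∨ (x ∈ kws ∧ PySem.Chars.isIn x.toList tl = true) := by
  induction kws generalizing f with
  | nil => simp
  | cons kw rest ih =>
    simp only [List.foldl_cons, ih, List.mem_cons]
    split_ifs with h
    · simp only [PySem.Set.mem_add]
      constructor
      · rintro ((hf | rfl) | hr)
        · exact Or.inl hf
        · exact Or.inr ⟨Or.inl rfl, h⟩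
        · exact Or.inr ⟨Or.inr hr.1, hr.2⟩
      · rintro (hf | ⟨(rfl | hr), hs⟩)
        · exact Or.inl (Or.inl hf)
        · exact Or.inl (Or.inr rfl)
        · exact Or.inr ⟨hr, hs⟩
    · constructor
      · rintro (hf | hr)
        · exact Or.inl hf
        · exact Or.inr ⟨Or.inr hr.1, hr.2⟩
      · rintro (hf | ⟨(rfl | hr), hs⟩)
        · exact Or.inl hf
        · exact absurd hs (by simpa using h)
        · exact Or.inr ⟨hr, hs⟩

theorem mem_pvFound (tl : List Char) (kws : PySem.Set String) (x : String) :
    x ∈ pvFound tl kws ↔ x ∈ kws ∧ PySem.Chars.isIn x.toList tl = true := by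
  unfold pvFound
  rw [mem_pvFound_aux]
  simp [PySem.Set.empty]

theorem pvHitA_eq_any (tl : List Char) (ks : List String) :
    pvHitA tl ks = ks.any (fun kw => PySem.Chars.isIn kw.toList tl) := by
  induction ks with
  | nil => rfl
  | cons kw rest ih =>
    simp only [pvHitA, List.any_cons, ih]
    split_ifs with h <;> simp [h]

theorem inter_nonempty_iff (s t : List String) :
    (!(PySem.Set.inter s t).isEmpty) = true ↔ ∃ x ∈ s, x ∈ t := by
  rw [Bool.not_eq_eq_eq_not, Bool.not_true, List.isEmpty_eq_false_iff_exists_mem]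
  constructor
  · rintro ⟨x, hx⟩
    rw [PySem.Set.mem_inter _ _ _] at hx
    exact ⟨x, hx⟩
  · rintro ⟨x, hs, ht⟩
    exact ⟨x, (PySem.Set.mem_inter _ _ _).mpr ⟨hs, ht⟩⟩

theorem pvSectionA_eq_pvEmit (tl : List Char) (kws : PySem.Set String)
    (sec : List (String × List String))
    (hsub : ∀ p ∈ sec, ∀ k ∈ p.2, k ∈ kws) :
    pvSectionA tl sec = pvEmit (pvFound tl kws) sec := by
  unfold pvSectionA pvEmit
  rw [PySem.List.foldl_append_if, List.nil_append]
  have hfc : sec.filter (fun p => pvHitA tl p.2)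
      = sec.filter (fun p => !(PySem.Set.inter (pvFound tl kws) p.2).isEmpty) := by
    apply List.filter_congr
    intro p hp
    rw [pvHitA_eq_any, Bool.eq_iff_iff, inter_nonempty_iff]
    simp only [List.any_eq_true, mem_pvFound]
    constructor
    · rintro ⟨k, hk, hin⟩
      exact ⟨k, ⟨hsub p hp k hk, hin⟩, hk⟩
    · rintro ⟨k, ⟨_, hin⟩, hk⟩
      exact ⟨k, hk, hin⟩
  rw [hfc]

-- ===== VERDICT (by name: the statement is the Claim_ definition above) =====
theorem auto_tag_spec : Claim_equal_auto_tag := by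
  intro text tag_mapping _
  show auto_tag text tag_mapping = auto_tag_alt text tag_mapping
  have main : ∀ (tl : List Char) (topics auds : List (String × List String)),
      (pvSectionA tl topics, pvSectionA tl auds) =
      (pvEmit (pvFound tl (PySem.Set.ofList ((topics ++ auds).flatMap (·.2)))) topics,
       pvEmit (pvFound tl (PySem.Set.ofList ((topics ++ auds).flatMap (·.2)))) auds) := by
    intro tl topics auds
    simp only [Prod.mk.injEq]
    constructor
    · apply pvSectionA_eq_pvEmit
      intro p hp k hk
      rw [PySem.Set.mem_ofList, List.mem_flatMap]
      exact ⟨p, List.mem_append_left _ hp, hk⟩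
    · apply pvSectionA_eq_pvEmit
      intro p hp k hk
      rw [PySem.Set.mem_ofList, List.mem_flatMap]
      exact ⟨p, List.mem_append_right _ hp, hk⟩
  exact main (PySem.Chars.lower text.toList)
    ((PySem.Dict.mk tag_mapping).getD "topic_keywords" [])
    ((PySem.Dict.mk tag_mapping).getD "audience_keywords" [])
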